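-- pv_equiv track=rewrite | github.com/IceWhistle/rauli-stack | model-router.py | recommend_model
-- ===== SOURCE A (Python) =====
-- def recommend_model(task_type, task_description):
--     """Recommend best model based on task type"""
--
--     # High-stakes legal work
--     if task_type == 'legal':
--         if any(word in task_description.lower() for word in ['strategy', 'motion', 'filing', 'important', 'critical']):
--             return 'opus', 'HIGH-STAKES LEGAL - Maximum accuracy needed'
--         return 'sonnet', 'LEGAL ANALYSIS - Nuanced reasoning required'
--
--     # Complex reasoning
--     if task_type == 'complex_reasoning':
--         if any(word in task_description.lower() for word in ['deep', 'thorough', 'comprehensive', 'important']):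
--             return 'opus', 'DEEP ANALYSIS - Maximum reasoning capability'
--         return 'sonnet', 'COMPLEX REASONING - Detailed analysis needed'
--
--     # Creative writing
--     if task_type == 'creative_writing':
--         if any(word in task_description.lower() for word in ['professional', 'important', 'formal']):
--             return 'sonnet', 'PROFESSIONAL WRITING - Quality and tone matter'
--         return 'kimi', 'CREATIVE WRITING - Fast generation acceptable'
--
--     # Code tasks
--     if task_type == 'code':
--         if any(word in task_description.lower() for word in ['debug', 'fix', 'review', 'architect', 'design']):
--             return 'sonnet', 'CODE REVIEW/DEBUG - Accuracy critical'
--         return 'kimi', 'CODE GENERATION - Fast and capable'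
--
--     # Research
--     if task_type == 'research':
--         if any(word in task_description.lower() for word in ['deep', 'comprehensive', 'detailed', 'thorough']):
--             return 'sonnet', 'DEEP RESEARCH - Quality synthesis needed'
--         return 'kimi', 'QUICK RESEARCH - Fast information retrieval'
--
--     # Routine tasks
--     if task_type == 'routine':
--         return 'kimi', 'ROUTINE TASK - Speed optimized'
--
--     # Quick questions
--     if task_type == 'quick':
--         return 'kimi', 'QUICK QUESTION - Minimal latency'
--
--     # Default
--     return 'kimi', 'GENERAL TASK - Balanced performance'
-- ===== SOURCE B (Python) =====
-- # Decision list: one flat, ordered table of (type, keyword, model, reason) rules,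
-- # interpreted by a single first-match-wins scan; None acts as a wildcard.
-- RULES = [
--     ('legal', 'strategy', 'opus', 'HIGH-STAKES LEGAL - Maximum accuracy needed'),
--     ('legal', 'motion', 'opus', 'HIGH-STAKES LEGAL - Maximum accuracy needed'),
--     ('legal', 'filing', 'opus', 'HIGH-STAKES LEGAL - Maximum accuracy needed'),
--     ('legal', 'important', 'opus', 'HIGH-STAKES LEGAL - Maximum accuracy needed'),
--     ('legal', 'critical', 'opus', 'HIGH-STAKES LEGAL - Maximum accuracy needed'),
--     ('legal', None, 'sonnet', 'LEGAL ANALYSIS - Nuanced reasoning required'),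
--     ('complex_reasoning', 'deep', 'opus', 'DEEP ANALYSIS - Maximum reasoning capability'),
--     ('complex_reasoning', 'thorough', 'opus', 'DEEP ANALYSIS - Maximum reasoning capability'),
--     ('complex_reasoning', 'comprehensive', 'opus', 'DEEP ANALYSIS - Maximum reasoning capability'),
--     ('complex_reasoning', 'important', 'opus', 'DEEP ANALYSIS - Maximum reasoning capability'),
--     ('complex_reasoning', None, 'sonnet', 'COMPLEX REASONING - Detailed analysis needed'),
--     ('creative_writing', 'professional', 'sonnet', 'PROFESSIONAL WRITING - Quality and tone matter'),
--     ('creative_writing', 'important', 'sonnet', 'PROFESSIONAL WRITING - Quality and tone matter'),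
--     ('creative_writing', 'formal', 'sonnet', 'PROFESSIONAL WRITING - Quality and tone matter'),
--     ('creative_writing', None, 'kimi', 'CREATIVE WRITING - Fast generation acceptable'),
--     ('code', 'debug', 'sonnet', 'CODE REVIEW/DEBUG - Accuracy critical'),
--     ('code', 'fix', 'sonnet', 'CODE REVIEW/DEBUG - Accuracy critical'),
--     ('code', 'review', 'sonnet', 'CODE REVIEW/DEBUG - Accuracy critical'),
--     ('code', 'architect', 'sonnet', 'CODE REVIEW/DEBUG - Accuracy critical'),
--     ('code', 'design', 'sonnet', 'CODE REVIEW/DEBUG - Accuracy critical'),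
--     ('code', None, 'kimi', 'CODE GENERATION - Fast and capable'),
--     ('research', 'deep', 'sonnet', 'DEEP RESEARCH - Quality synthesis needed'),
--     ('research', 'comprehensive', 'sonnet', 'DEEP RESEARCH - Quality synthesis needed'),
--     ('research', 'detailed', 'sonnet', 'DEEP RESEARCH - Quality synthesis needed'),
--     ('research', 'thorough', 'sonnet', 'DEEP RESEARCH - Quality synthesis needed'),
--     ('research', None, 'kimi', 'QUICK RESEARCH - Fast information retrieval'),
--     ('routine', None, 'kimi', 'ROUTINE TASK - Speed optimized'),
--     ('quick', None, 'kimi', 'QUICK QUESTION - Minimal latency'),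
--     (None, None, 'kimi', 'GENERAL TASK - Balanced performance'),
-- ]
--
--
-- def recommend_model(task_type, task_description):
--     """Recommend best model based on task type"""
--     for rtype, keyword, model, reason in RULES:
--         if rtype is not None and rtype != task_type:
--             continue
--         if keyword is not None and keyword not in task_description.lower():
--             continue
--         return model, reason
-- ===== Notes on version B (the rewrite author's own statement) =====
-- stated objective: alternative
-- what changed: Replaces A's seven-branch if-chain with inline any()-over-keyword-list tests by a flat ordered decision list of single-keyword rules (with None wildcards) interpreted by one first-match-wins scan.
import Mathlib
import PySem

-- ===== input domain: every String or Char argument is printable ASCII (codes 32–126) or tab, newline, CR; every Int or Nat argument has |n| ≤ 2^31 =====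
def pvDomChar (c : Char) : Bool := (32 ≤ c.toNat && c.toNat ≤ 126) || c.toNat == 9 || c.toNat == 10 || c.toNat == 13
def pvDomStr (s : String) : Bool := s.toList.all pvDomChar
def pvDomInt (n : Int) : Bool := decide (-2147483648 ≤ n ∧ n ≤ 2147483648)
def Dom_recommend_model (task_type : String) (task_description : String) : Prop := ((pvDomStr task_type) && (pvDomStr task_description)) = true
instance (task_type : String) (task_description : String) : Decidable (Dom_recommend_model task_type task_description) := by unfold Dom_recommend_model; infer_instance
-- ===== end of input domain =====

-- B replaces A's if-chain by a flat first-match-wins decision list of single-keyword rules (objective: alternative).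

-- ===== PORT A =====
-- `any(word in task_description.lower() for word in ws)`
def pvAnyIn (ws : List String) (d : String) : Bool :=
  ws.any (fun w => PySem.Str.isIn w (PySem.Str.lower d))

def recommend_model (task_type : String) (task_description : String) : String × String :=
  if task_type = "legal" then
    if pvAnyIn ["strategy", "motion", "filing", "important", "critical"] task_description then
      ("opus", "HIGH-STAKES LEGAL - Maximum accuracy needed")
    else ("sonnet", "LEGAL ANALYSIS - Nuanced reasoning required")
  else if task_type = "complex_reasoning" then
    if pvAnyIn ["deep", "thorough", "comprehensive", "important"] task_description then
      ("opus", "DEEP ANALYSIS - Maximum reasoning capability")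
    else ("sonnet", "COMPLEX REASONING - Detailed analysis needed")
  else if task_type = "creative_writing" then
    if pvAnyIn ["professional", "important", "formal"] task_description then
      ("sonnet", "PROFESSIONAL WRITING - Quality and tone matter")
    else ("kimi", "CREATIVE WRITING - Fast generation acceptable")
  else if task_type = "code" then
    if pvAnyIn ["debug", "fix", "review", "architect", "design"] task_description then
      ("sonnet", "CODE REVIEW/DEBUG - Accuracy critical")
    else ("kimi", "CODE GENERATION - Fast and capable")
  else if task_type = "research" then
    if pvAnyIn ["deep", "comprehensive", "detailed", "thorough"] task_description then
      ("sonnet", "DEEP RESEARCH - Quality synthesis needed")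
    else ("kimi", "QUICK RESEARCH - Fast information retrieval")
  else if task_type = "routine" then
    ("kimi", "ROUTINE TASK - Speed optimized")
  else if task_type = "quick" then
    ("kimi", "QUICK QUESTION - Minimal latency")
  else
    ("kimi", "GENERAL TASK - Balanced performance")

-- ===== PORT B =====
-- the flat decision list: (type wildcard, keyword wildcard, model, reason)
def pvRules : List (Option String × Option String × String × String) :=
  [(some "legal", some "strategy", "opus", "HIGH-STAKES LEGAL - Maximum accuracy needed"),
   (some "legal", some "motion", "opus", "HIGH-STAKES LEGAL - Maximum accuracy needed"),
   (some "legal", some "filing", "opus", "HIGH-STAKES LEGAL - Maximum accuracy needed"),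
   (some "legal", some "important", "opus", "HIGH-STAKES LEGAL - Maximum accuracy needed"),
   (some "legal", some "critical", "opus", "HIGH-STAKES LEGAL - Maximum accuracy needed"),
   (some "legal", none, "sonnet", "LEGAL ANALYSIS - Nuanced reasoning required"),
   (some "complex_reasoning", some "deep", "opus", "DEEP ANALYSIS - Maximum reasoning capability"),
   (some "complex_reasoning", some "thorough", "opus", "DEEP ANALYSIS - Maximum reasoning capability"),
   (some "complex_reasoning", some "comprehensive", "opus", "DEEP ANALYSIS - Maximum reasoning capability"),
   (some "complex_reasoning", some "important", "opus", "DEEP ANALYSIS - Maximum reasoning capability"),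
   (some "complex_reasoning", none, "sonnet", "COMPLEX REASONING - Detailed analysis needed"),
   (some "creative_writing", some "professional", "sonnet", "PROFESSIONAL WRITING - Quality and tone matter"),
   (some "creative_writing", some "important", "sonnet", "PROFESSIONAL WRITING - Quality and tone matter"),
   (some "creative_writing", some "formal", "sonnet", "PROFESSIONAL WRITING - Quality and tone matter"),
   (some "creative_writing", none, "kimi", "CREATIVE WRITING - Fast generation acceptable"),
   (some "code", some "debug", "sonnet", "CODE REVIEW/DEBUG - Accuracy critical"),
   (some "code", some "fix", "sonnet", "CODE REVIEW/DEBUG - Accuracy critical"),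
   (some "code", some "review", "sonnet", "CODE REVIEW/DEBUG - Accuracy critical"),
   (some "code", some "architect", "sonnet", "CODE REVIEW/DEBUG - Accuracy critical"),
   (some "code", some "design", "sonnet", "CODE REVIEW/DEBUG - Accuracy critical"),
   (some "code", none, "kimi", "CODE GENERATION - Fast and capable"),
   (some "research", some "deep", "sonnet", "DEEP RESEARCH - Quality synthesis needed"),
   (some "research", some "comprehensive", "sonnet", "DEEP RESEARCH - Quality synthesis needed"),
   (some "research", some "detailed", "sonnet", "DEEP RESEARCH - Quality synthesis needed"),
   (some "research", some "thorough", "sonnet", "DEEP RESEARCH - Quality synthesis needed"),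
   (some "research", none, "kimi", "QUICK RESEARCH - Fast information retrieval"),
   (some "routine", none, "kimi", "ROUTINE TASK - Speed optimized"),
   (some "quick", none, "kimi", "QUICK QUESTION - Minimal latency"),
   (none, none, "kimi", "GENERAL TASK - Balanced performance")]

-- the `for … in RULES:` loop: return on first rule neither `continue` skips
def pvScan (rules : List (Option String × Option String × String × String))
    (task_type : String) (task_description : String) : Option (String × String) :=
  match rules with
  | [] => none   -- Python's implicit `return None`; unreachable: the last rule is a total wildcard
  | (rtype, keyword, model, reason) :: rest =>
    if rtype.elim false (fun t => t != task_type) then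
      pvScan rest task_type task_description
    else if keyword.elim false (fun k => ! PySem.Str.isIn k (PySem.Str.lower task_description)) then
      pvScan rest task_type task_description
    else some (model, reason)

def recommend_model_alt (task_type : String) (task_description : String) : String × String :=
  (pvScan pvRules task_type task_description).getD ("", "")

-- ===== PRECONDITION & SPEC =====
def Spec_recommend_model (task_type : String) (task_description : String) (out : String × String) : Prop := out = recommend_model_alt task_type task_description
instance (task_type : String) (task_description : String) (out : String × String) : Decidable (Spec_recommend_model task_type task_description out) := by unfold Spec_recommend_model; infer_instance

-- ===== CLAIM (what is proved, stated in full; the proofs are below) =====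
def Claim_equal_recommend_model : Prop := ∀ (task_type : String) (task_description : String), Dom_recommend_model task_type task_description → Spec_recommend_model task_type task_description (recommend_model task_type task_description)

-- ===== LEMMAS AND PROOFS =====
-- a "block" of the rules list: the keyword rules for one task type followed by its wildcard fallback
def pvBlock (t : String) (ks : List String) (up base : String × String) :
    List (Option String × Option String × String × String) :=
  ks.map (fun k => (some t, some k, up.1, up.2)) ++ [(some t, none, base.1, base.2)]

theorem pvRules_blocks : pvRules =
    pvBlock "legal" ["strategy", "motion", "filing", "important", "critical"]
      ("opus", "HIGH-STAKES LEGAL - Maximum accuracy needed")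
      ("sonnet", "LEGAL ANALYSIS - Nuanced reasoning required") ++
    (pvBlock "complex_reasoning" ["deep", "thorough", "comprehensive", "important"]
      ("opus", "DEEP ANALYSIS - Maximum reasoning capability")
      ("sonnet", "COMPLEX REASONING - Detailed analysis needed") ++
    (pvBlock "creative_writing" ["professional", "important", "formal"]
      ("sonnet", "PROFESSIONAL WRITING - Quality and tone matter")
      ("kimi", "CREATIVE WRITING - Fast generation acceptable") ++
    (pvBlock "code" ["debug", "fix", "review", "architect", "design"]
      ("sonnet", "CODE REVIEW/DEBUG - Accuracy critical")
      ("kimi", "CODE GENERATION - Fast and capable") ++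
    (pvBlock "research" ["deep", "comprehensive", "detailed", "thorough"]
      ("sonnet", "DEEP RESEARCH - Quality synthesis needed")
      ("kimi", "QUICK RESEARCH - Fast information retrieval") ++
    (pvBlock "routine" [] ("", "") ("kimi", "ROUTINE TASK - Speed optimized") ++
    (pvBlock "quick" [] ("", "") ("kimi", "QUICK QUESTION - Minimal latency") ++
    [(none, none, "kimi", "GENERAL TASK - Balanced performance")])))))) := rfl

theorem scan_block_ne (t : String) (ks : List String) (up base : String × String)
    (rest : List (Option String × Option String × String × String))
    (tt td : String) (h : t ≠ tt) :
    pvScan (pvBlock t ks up base ++ rest) tt td = pvScan rest tt td := by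
  induction ks with
  | nil => simp [pvBlock, pvScan, bne_iff_ne, h]
  | cons k ks ih =>
    simpa [pvBlock, pvScan, bne_iff_ne, h] using ih

theorem scan_block_eq (t : String) (ks : List String) (up base : String × String)
    (rest : List (Option String × Option String × String × String)) (td : String) :
    pvScan (pvBlock t ks up base ++ rest) t td =
      some (if ks.any (fun k => PySem.Str.isIn k (PySem.Str.lower td)) then up else base) := by
  induction ks with
  | nil => simp [pvBlock, pvScan]
  | cons k ks ih =>
    simp only [pvBlock, List.map_cons, List.cons_append] at ih ⊢
    cases h : PySem.Str.isIn k (PySem.Str.lower td) with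
    | false =>
      simp only [pvScan, Option.elim, bne_self_eq_false, Bool.false_eq_true, if_false, h,
        Bool.not_false, if_true, List.any_cons, Bool.false_or]
      exact ih
    | true =>
      simp only [pvScan, Option.elim, bne_self_eq_false, Bool.false_eq_true, if_false, h,
        Bool.not_true, List.any_cons, Bool.true_or, if_pos]

theorem rm_eq (tt td : String) : recommend_model tt td = recommend_model_alt tt td := by
  unfold recommend_model recommend_model_alt
  rw [pvRules_blocks]
  by_cases h1 : tt = "legal"
  · subst h1; rw [scan_block_eq]; simp [pvAnyIn]
  rw [scan_block_ne _ _ _ _ _ _ _ (Ne.symm h1)]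
  by_cases h2 : tt = "complex_reasoning"
  · subst h2; rw [scan_block_eq]; simp [pvAnyIn, h1]
  rw [scan_block_ne _ _ _ _ _ _ _ (Ne.symm h2)]
  by_cases h3 : tt = "creative_writing"
  · subst h3; rw [scan_block_eq]; simp [pvAnyIn, h1, h2]
  rw [scan_block_ne _ _ _ _ _ _ _ (Ne.symm h3)]
  by_cases h4 : tt = "code"
  · subst h4; rw [scan_block_eq]; simp [pvAnyIn, h1, h2, h3]
  rw [scan_block_ne _ _ _ _ _ _ _ (Ne.symm h4)]
  by_cases h5 : tt = "research"
  · subst h5; rw [scan_block_eq]; simp [pvAnyIn, h1, h2, h3, h4]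
  rw [scan_block_ne _ _ _ _ _ _ _ (Ne.symm h5)]
  by_cases h6 : tt = "routine"
  · subst h6; rw [scan_block_eq]; simp [h1, h2, h3, h4, h5]
  rw [scan_block_ne _ _ _ _ _ _ _ (Ne.symm h6)]
  by_cases h7 : tt = "quick"
  · subst h7; rw [scan_block_eq]; simp [h1, h2, h3, h4, h5, h6]
  rw [scan_block_ne _ _ _ _ _ _ _ (Ne.symm h7)]
  simp [pvScan, h1, h2, h3, h4, h5, h6, h7]

-- ===== VERDICT (by name: the statement is the Claim_ definition above) =====
theorem recommend_model_spec : Claim_equal_recommend_model := by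
  intro tt td _
  unfold Spec_recommend_model
  exact rm_eq tt td
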